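-- pv_equiv track=rewrite | github.com/brl0/bripy | src/bripy/bllb/str.py | get_acronyms
-- ===== SOURCE A (Python) =====
-- import string
--
-- def get_acronyms(text: str) -> list[str]:
--     """Extract uppercase only potential acronyms from string."""
--     return [
--         _
--         for _ in text.translate(
--             str.maketrans(string.ascii_lowercase, " " * len(string.ascii_lowercase))
--         ).split()
--         if len(_) > 1
--     ]
-- ===== SOURCE B (Python) =====
-- def get_acronyms(text: str) -> list[str]:
--     """Extract uppercase only potential acronyms from string."""
--     out = []
--     cur = ""
--     for c in text:
--         if 'a' <= c <= 'z' or c.isspace():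
--             if len(cur) > 1:
--                 out.append(cur)
--             cur = ""
--         else:
--             cur += c
--     if len(cur) > 1:
--         out.append(cur)
--     return out
-- ===== Notes on version B (the rewrite author's own statement) =====
-- stated objective: alternative
-- what changed: B replaces A's translate-table-plus-split tokenization with a single character-by-character scan that accumulates runs of non-lowercase non-whitespace characters and emits those longer than one character.
import Mathlib
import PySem

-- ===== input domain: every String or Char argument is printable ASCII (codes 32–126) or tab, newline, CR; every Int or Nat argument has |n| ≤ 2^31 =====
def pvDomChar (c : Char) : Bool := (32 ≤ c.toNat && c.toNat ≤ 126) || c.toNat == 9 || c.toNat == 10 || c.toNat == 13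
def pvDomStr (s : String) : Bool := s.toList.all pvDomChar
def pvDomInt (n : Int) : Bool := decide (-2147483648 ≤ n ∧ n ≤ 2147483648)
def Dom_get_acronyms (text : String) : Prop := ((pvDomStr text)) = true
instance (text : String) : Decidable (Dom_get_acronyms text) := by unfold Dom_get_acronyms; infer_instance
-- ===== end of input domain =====

-- B tokenizes with one char-by-char scan (runs of non-lowercase, non-whitespace chars) instead of
-- A's translate-table-plus-split; alternative decomposition, same cost; return values proved equal.

-- ===== PORT A =====
-- text.translate(maketrans(ascii_lowercase, ' '*26)): replace each ASCII lowercase char by a space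
def pvTranslate (c : Char) : Char := if PySem.Chars.islower c then ' ' else c

def get_acronyms (text : String) : List String :=
  (PySem.Str.split₀ (String.ofList (text.toList.map pvTranslate))).filter
    (fun w => 1 < PySem.Str.len w)

-- ===== PORT B =====
-- the loop of Source B: `out`, `cur` accumulators; close the current run on a separator char
def goB : List Char → List Char → List String → List String
  | [], cur, out => if cur.length > 1 then out ++ [String.ofList cur] else out
  | c :: rest, cur, out =>
    if (decide ('a' ≤ c) && decide (c ≤ 'z')) || PySem.Chars.isspace c then
      goB rest [] (if cur.length > 1 then out ++ [String.ofList cur] else out)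
    else
      goB rest (cur ++ [c]) out

def get_acronyms_alt (text : String) : List String :=
  goB text.toList [] []

-- ===== PRECONDITION & SPEC =====
def Spec_get_acronyms (text : String) (out : List String) : Prop := out = get_acronyms_alt text
instance (text : String) (out : List String) : Decidable (Spec_get_acronyms text out) := by unfold Spec_get_acronyms; infer_instance

-- ===== CLAIM (what is proved, stated in full; the proofs are below) =====
def Claim_equal_get_acronyms : Prop := ∀ (text : String), Dom_get_acronyms text → Spec_get_acronyms text (get_acronyms text)

-- ===== LEMMAS AND PROOFS =====

theorem goB_out (s : List Char) (cur : List Char) (out : List String) :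
    goB s cur out = out ++ goB s cur [] := by
  induction s generalizing cur out with
  | nil => simp only [goB, List.nil_append]; split <;> simp
  | cons c rest ih =>
    simp only [goB, List.nil_append]
    split
    · rw [ih [] (if cur.length > 1 then out ++ [String.ofList cur] else out),
          ih [] (if cur.length > 1 then [String.ofList cur] else [])]
      split <;> simp
    · rw [ih (cur ++ [c]) out]

theorem goA_acc (s cur : List Char) (acc : List (List Char)) :
    PySem.Chars.split₀.go s cur acc = acc.reverse ++ PySem.Chars.split₀.go s cur [] := by
  induction s generalizing cur acc with
  | nil => simp only [PySem.Chars.split₀.go]; split <;> simp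
  | cons c rest ih =>
    simp only [PySem.Chars.split₀.go]
    split
    · split
      · exact ih [] acc
      · rw [ih [] (cur.reverse :: acc), ih [] [cur.reverse]]; simp
    · exact ih (c :: cur) acc

theorem filter_single (cur : List Char) :
    (List.filter (fun w => decide (1 < ((w.length : Nat) : Int))) [cur]).map String.ofList
      = if cur.length > 1 then [String.ofList cur] else [] := by
  by_cases hl : 1 < cur.length
  · have h2 : (1 : Int) < ((cur.length : Nat) : Int) := by exact_mod_cast hl
    simp [List.filter, h2, hl]
  · have h2 : ¬ (1 : Int) < ((cur.length : Nat) : Int) := by exact_mod_cast hl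
    simp [List.filter, h2, hl]

theorem main_lemma (s cur : List Char) :
    ((PySem.Chars.split₀.go (s.map pvTranslate) cur.reverse []).filter
        (fun w => decide (1 < ((w.length : Nat) : Int)))).map String.ofList = goB s cur [] := by
  induction s generalizing cur with
  | nil =>
    simp only [List.map_nil, PySem.Chars.split₀.go, goB, List.nil_append]
    by_cases h : cur = []
    · subst h; simp
    · have he : cur.reverse.isEmpty = false := by simp [h]
      rw [he]
      simp only [Bool.false_eq_true, if_false, List.reverse_reverse, List.reverse_cons,
        List.reverse_nil, List.nil_append]
      exact filter_single cur
  | cons c rest ih =>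
    simp only [List.map_cons, PySem.Chars.split₀.go, goB, pvTranslate, List.nil_append]
    have hlow : (decide ('a' ≤ c) && decide (c ≤ 'z')) = PySem.Chars.islower c := rfl
    rw [hlow]
    by_cases hsep : (PySem.Chars.islower c || PySem.Chars.isspace c) = true
    · have hsp : PySem.Chars.isspace (if PySem.Chars.islower c = true then ' ' else c) = true := by
        rcases Bool.or_eq_true_iff.mp hsep with h | h
        · rw [if_pos h]; decide
        · split
          · decide
          · exact h
      rw [if_pos hsp, if_pos hsep]
      by_cases h : cur = []
      · subst h
        simp only [List.reverse_nil, List.isEmpty_nil, if_true, List.length_nil]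
        rw [if_neg (by omega)]
        exact ih []
      · have he : cur.reverse.isEmpty = false := by simp [h]
        rw [he]
        simp only [Bool.false_eq_true, if_false, List.reverse_reverse]
        rw [goA_acc _ [] [cur], goB_out rest []]
        simp only [List.reverse_cons, List.reverse_nil, List.nil_append, List.filter_append,
          List.map_append]
        have hih := ih []
        simp only [List.reverse_nil] at hih
        rw [hih, filter_single cur]
    · have hb : (PySem.Chars.islower c || PySem.Chars.isspace c) = false :=
        Bool.eq_false_iff.mpr hsep
      have h1 : PySem.Chars.islower c = false := by
        rcases Bool.or_eq_false_iff.mp hb with ⟨h1, _⟩; exact h1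
      have h2 : PySem.Chars.isspace c = false := by
        rcases Bool.or_eq_false_iff.mp hb with ⟨_, h2⟩; exact h2
      have hsp : PySem.Chars.isspace (if PySem.Chars.islower c = true then ' ' else c) = false := by
        rw [if_neg (by simp [h1])]; exact h2
      have hA : ¬ (PySem.Chars.isspace (if PySem.Chars.islower c = true then ' ' else c) = true) := by
        rw [hsp]; simp
      rw [if_neg hA, if_neg hsep]
      have hc : (if PySem.Chars.islower c = true then ' ' else c) = c :=
        if_neg (show ¬ (PySem.Chars.islower c = true) by rw [h1]; simp)
      rw [hc]
      have hr : c :: cur.reverse = (cur ++ [c]).reverse := by simp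
      rw [hr]
      exact ih (cur ++ [c])

-- ===== VERDICT (by name: the statement is the Claim_ definition above) =====
theorem get_acronyms_spec : Claim_equal_get_acronyms := by
  intro text _
  show get_acronyms text = get_acronyms_alt text
  unfold get_acronyms get_acronyms_alt PySem.Str.split₀ PySem.Chars.split₀
  rw [List.filter_map]
  have hpred : ((fun w => decide (1 < PySem.Str.len w)) ∘ String.ofList) =
      fun (w : List Char) => decide (1 < ((w.length : Nat) : Int)) := by
    funext w
    simp [PySem.Str.len]
  rw [hpred]
  have := main_lemma text.toList []
  simpa using this
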